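-- pv_equiv track=rewrite | github.com/jacksonal/adventofcode.2020 | day5.py | binaryTraverse
-- ===== SOURCE A (Python) =====
-- def binaryTraverse(instruction, segment):
--     if len(instruction) == 0:
--         return segment[0]
--     nextInstruction = instruction[1:]
--
--     if instruction[0] == 'F' or instruction[0] == 'L':
--         return binaryTraverse(nextInstruction, segment[:len(segment)//2])
--     else:
--         return binaryTraverse(nextInstruction, segment[len(segment)//2:])
-- ===== SOURCE B (Python) =====
-- def binaryTraverse(instruction, segment):
--     lo, size = 0, len(segment)
--     for c in instruction:
--         half = size // 2
--         if c == 'F' or c == 'L':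
--             size = half
--         else:
--             lo += half
--             size -= half
--     return segment[lo]
-- ===== Notes on version B (the rewrite author's own statement) =====
-- stated objective: faster
-- what changed: Replaced the recursion on shrinking list slices by a single iterative pass that tracks the window with integer offsets lo/size and indexes the original list once at the end; no per-step slice copies, measured clearly faster.
-- outside the precondition, e.g. on binaryTraverse('F', [5]): A raises IndexError, B returns 5
import Mathlib
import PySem

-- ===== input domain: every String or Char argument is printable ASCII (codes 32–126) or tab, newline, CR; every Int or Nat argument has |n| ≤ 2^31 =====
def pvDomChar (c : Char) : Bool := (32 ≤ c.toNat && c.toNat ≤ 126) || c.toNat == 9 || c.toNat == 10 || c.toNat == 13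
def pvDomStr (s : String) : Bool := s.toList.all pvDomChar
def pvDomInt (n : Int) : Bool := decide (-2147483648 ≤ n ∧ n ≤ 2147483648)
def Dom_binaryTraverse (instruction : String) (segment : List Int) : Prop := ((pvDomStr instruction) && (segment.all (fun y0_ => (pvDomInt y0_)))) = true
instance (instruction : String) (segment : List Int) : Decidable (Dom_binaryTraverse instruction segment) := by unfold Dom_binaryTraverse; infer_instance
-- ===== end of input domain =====

-- B replaces A's recursion on list slices by one iterative pass over the characters
-- keeping an integer window (lo, size) into the original list; return value only, no side effects.

-- ===== PORT A =====
-- literal transliteration of A's recursion; segment[0] on an empty final segment is an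
-- IndexError in Python (pyGet? = none), excluded by Pre_ below; .getD 0 is unreached on Pre_.
def binaryTraverseA : List Char → List Int → Int
  | [], seg => (PySem.List.pyGet? seg 0).getD 0
  | c :: rest, seg =>
      if c = 'F' ∨ c = 'L' then
        binaryTraverseA rest (PySem.List.slice seg none (some (PySem.Int.floordiv (seg.length : Int) 2)))
      else
        binaryTraverseA rest (PySem.List.slice seg (some (PySem.Int.floordiv (seg.length : Int) 2)) none)

def binaryTraverse (instruction : String) (segment : List Int) : Int :=
  binaryTraverseA instruction.toList segment

-- ===== PORT B =====
def btStep (p : Int × Int) (c : Char) : Int × Int :=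
  let half := PySem.Int.floordiv p.2 2
  if c = 'F' ∨ c = 'L' then (p.1, half) else (p.1 + half, p.2 - half)

def binaryTraverse_alt (instruction : String) (segment : List Int) : Int :=
  let r := instruction.toList.foldl btStep (0, (segment.length : Int))
  (PySem.List.pyGet? segment r.1).getD 0

-- ===== PRECONDITION & SPEC =====
-- weight of the characters that select the upper half ('not F and not L'), bit i worth 2^i
def pvUpperWeight : List Char → Nat
  | [] => 0
  | c :: rest => (if c = 'F' ∨ c = 'L' then 0 else 1) + 2 * pvUpperWeight rest

-- Pre_ excludes exactly the inputs where the Python A raises IndexError (the final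
-- window is empty, i.e. (len(segment) + W) // 2^len(instruction) = 0); A returns on all of Pre_.
def Pre_binaryTraverse (instruction : String) (segment : List Int) : Prop :=
  2 ^ instruction.length ≤ segment.length + pvUpperWeight instruction.toList

instance (instruction : String) (segment : List Int) : Decidable (Pre_binaryTraverse instruction segment) := by
  unfold Pre_binaryTraverse; infer_instance

def pvWitness_binaryTraverse : String × List Int := ("FR", [3, 1, 4, 1])

def Spec_binaryTraverse (instruction : String) (segment : List Int) (out : Int) : Prop := out = binaryTraverse_alt instruction segment
instance (instruction : String) (segment : List Int) (out : Int) : Decidable (Spec_binaryTraverse instruction segment out) := by unfold Spec_binaryTraverse; infer_instance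

-- ===== CLAIM (what is proved, stated in full; the proofs are below) =====
def Claim_equal_binaryTraverse : Prop := ∀ (instruction : String) (segment : List Int), Dom_binaryTraverse instruction segment → Pre_binaryTraverse instruction segment → Spec_binaryTraverse instruction segment (binaryTraverse instruction segment)

-- ===== LEMMAS AND PROOFS =====

-- abstract size/offset evolution of the window, in Nat
def natSize : List Char → Nat → Nat
  | [], n => n
  | c :: rest, n => natSize rest (if c = 'F' ∨ c = 'L' then n / 2 else n - n / 2)

def natLo : List Char → Nat → Nat
  | [], _ => 0
  | c :: rest, n => if c = 'F' ∨ c = 'L' then natLo rest (n / 2) else n / 2 + natLo rest (n - n / 2)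

lemma fd2 (n : Nat) : PySem.Int.floordiv (n : Int) 2 = ((n / 2 : Nat) : Int) := by
  exact_mod_cast PySem.Int.floordiv_natCast n 2

lemma fold_eq (cs : List Char) : ∀ (lo : Int) (n : Nat),
    List.foldl btStep (lo, (n : Int)) cs = (lo + natLo cs n, (natSize cs n : Int)) := by
  induction cs with
  | nil => intro lo n; simp [natLo, natSize]
  | cons c rest ih =>
    intro lo n
    have hle : n / 2 ≤ n := Nat.div_le_self n 2
    have hcast : (n : Int) - ((n / 2 : Nat) : Int) = ((n - n / 2 : Nat) : Int) := by omega
    by_cases h : c = 'F' ∨ c = 'L'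
    · rw [List.foldl_cons, btStep, fd2, if_pos h, ih, natLo, natSize, if_pos h, if_pos h]
    · rw [List.foldl_cons, btStep, fd2, if_neg h, hcast, ih, natLo, natSize, if_neg h, if_neg h]
      push_cast
      ring_nf

lemma natSize_formula (cs : List Char) : ∀ n : Nat,
    natSize cs n = (n + pvUpperWeight cs) / 2 ^ cs.length := by
  induction cs with
  | nil => intro n; simp [natSize, pvUpperWeight]
  | cons c rest ih =>
    intro n
    by_cases h : c = 'F' ∨ c = 'L'
    · have h1 : n / 2 + pvUpperWeight rest = (n + (0 + 2 * pvUpperWeight rest)) / 2 := by omega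
      simp only [natSize, ih, pvUpperWeight, if_pos h, h1, List.length_cons,
        Nat.div_div_eq_div_mul]
      congr 1
      ring
    · have h1 : (n - n / 2) + pvUpperWeight rest = (n + (1 + 2 * pvUpperWeight rest)) / 2 := by omega
      simp only [natSize, ih, pvUpperWeight, if_neg h, h1, List.length_cons,
        Nat.div_div_eq_div_mul]
      congr 1
      ring

lemma natLo_add_natSize_le (cs : List Char) : ∀ n : Nat, natLo cs n + natSize cs n ≤ n := by
  induction cs with
  | nil => intro n; simp [natLo, natSize]
  | cons c rest ih =>
    intro n
    by_cases h : c = 'F' ∨ c = 'L'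
    · simp only [natLo, natSize, if_pos h]
      have := ih (n / 2)
      omega
    · simp only [natLo, natSize, if_neg h]
      have := ih (n - n / 2)
      omega

lemma traverseA_eq_getD (cs : List Char) : ∀ (seg : List Int),
    1 ≤ natSize cs seg.length →
    binaryTraverseA cs seg = seg.getD (natLo cs seg.length) 0 := by
  induction cs with
  | nil =>
    intro seg h
    simp only [natSize] at h
    simp [binaryTraverseA, natLo, PySem.List.pyGet?_zero, List.getD]
  | cons c rest ih =>
    intro seg h
    by_cases hc : c = 'F' ∨ c = 'L'
    · have hslice : PySem.List.slice seg none (some (PySem.Int.floordiv (seg.length : Int) 2))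
          = seg.take (seg.length / 2) := by
        rw [fd2, PySem.List.slice_to_natCast]
      have hlen : (seg.take (seg.length / 2)).length = seg.length / 2 := by
        simp [Nat.min_eq_left (Nat.div_le_self _ _)]
      have hsz : 1 ≤ natSize rest (seg.length / 2) := by
        simpa [natSize, hc] using h
      have hlt : natLo rest (seg.length / 2) < seg.length / 2 := by
        have := natLo_add_natSize_le rest (seg.length / 2); omega
      rw [binaryTraverseA, if_pos hc, hslice, ih _ (by rw [hlen]; exact hsz)]
      simp only [natLo, if_pos hc, List.getD, hlen]
      rw [List.getElem?_take_of_lt hlt]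
    · have hslice : PySem.List.slice seg (some (PySem.Int.floordiv (seg.length : Int) 2)) none
          = seg.drop (seg.length / 2) := by
        rw [fd2, PySem.List.slice_from_natCast]
      have hlen : (seg.drop (seg.length / 2)).length = seg.length - seg.length / 2 := by
        simp
      have hsz : 1 ≤ natSize rest (seg.length - seg.length / 2) := by
        simpa [natSize, hc] using h
      rw [binaryTraverseA, if_neg hc, hslice, ih _ (by rw [hlen]; exact hsz)]
      simp only [natLo, if_neg hc, List.getD, hlen]
      rw [List.getElem?_drop]

-- ===== VERDICT (by name: the statement is the Claim_ definition above) =====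
theorem binaryTraverse_spec : Claim_equal_binaryTraverse := by
  intro instruction segment _ hpre
  unfold Spec_binaryTraverse binaryTraverse binaryTraverse_alt
  set cs := instruction.toList with hcs
  set n := segment.length with hn
  have hlen : cs.length = instruction.length := by simp [hcs]
  have hsz : 1 ≤ natSize cs n := by
    rw [natSize_formula]
    have hpos : 0 < 2 ^ cs.length := Nat.pow_pos (by norm_num)
    rw [Nat.le_div_iff_mul_le hpos, one_mul, hlen]
    unfold Pre_binaryTraverse at hpre
    omega
  have hlt : natLo cs n < n := by
    have := natLo_add_natSize_le cs n; omega
  rw [fold_eq, traverseA_eq_getD cs segment (hn ▸ hsz)]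
  simp [PySem.List.pyGet?_natCast, List.getD, hn]
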